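-- pv_equiv track=rewrite | github.com/billyporter/ShakespeareToTrumpNLP | src/baseline/baseline.py | get_potential
-- ===== SOURCE A (Python) =====
-- def get_potential(shake_line, trump_speech, trump_tweets):
--     shake_words = shake_line.split()
--     shake_length = len(shake_words)
--     potential = []
--     combined_trump = trump_speech + trump_tweets
--     margin = 3
--     while len(potential) == 0:
--         for line in combined_trump:
--             trump_words = line.split()
--             if len(trump_words) < shake_length + margin and len(
--                     trump_words) > shake_length - margin:
--                 potential.append(trump_words)
--         margin += 1
--     return potential
-- ===== SOURCE B (Python) =====
-- def get_potential(shake_line, trump_speech, trump_tweets):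
--     shake_length = len(shake_line.split())
--     combined = trump_speech + trump_tweets
--     dists = [abs(len(line.split()) - shake_length) for line in combined]
--     threshold = max(3, min(dists) + 1)
--     return [line.split() for line in combined
--             if abs(len(line.split()) - shake_length) < threshold]
-- ===== Notes on version B (the rewrite author's own statement) =====
-- stated objective: simpler
-- what changed: Replaces the repeated whole-list rescans with an ever-growing margin by computing each line's word-count distance once, taking the minimum, and doing a single filter pass with threshold max(3, min_distance+1).
import Mathlib
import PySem

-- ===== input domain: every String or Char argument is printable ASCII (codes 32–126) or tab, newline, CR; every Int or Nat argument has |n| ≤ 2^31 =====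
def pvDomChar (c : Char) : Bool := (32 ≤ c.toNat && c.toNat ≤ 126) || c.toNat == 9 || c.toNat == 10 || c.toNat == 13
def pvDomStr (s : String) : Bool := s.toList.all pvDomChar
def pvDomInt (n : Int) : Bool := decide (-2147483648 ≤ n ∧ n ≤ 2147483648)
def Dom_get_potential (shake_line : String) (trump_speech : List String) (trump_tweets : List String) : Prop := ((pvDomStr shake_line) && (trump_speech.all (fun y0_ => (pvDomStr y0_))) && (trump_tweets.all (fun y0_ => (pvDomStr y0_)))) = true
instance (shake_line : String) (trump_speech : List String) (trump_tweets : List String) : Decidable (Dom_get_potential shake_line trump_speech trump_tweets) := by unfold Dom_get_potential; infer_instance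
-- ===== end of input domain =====

-- B computes each line's word-count distance once and filters once with threshold
-- max(3, min_distance+1), instead of A's repeated rescans with a growing margin;
-- objective: simpler (single pass over precomputed distances).

-- ===== PORT A =====
-- word-count distance of a line from the target length n
def gpDist (n : Int) (line : String) : Int := |((PySem.Str.split₀ line).length : Int) - n|

-- A's while loop; fuel only makes the loop total (it is chosen large enough that the
-- loop finishes on its own on every input admitted by Pre_).
def gpLoop (n : Int) (combined : List String) (margin : Int) : Nat → List (List String)
  | 0 => []
  | fuel + 1 =>
    let potential := combined.foldl
      (fun acc line =>
        let trump_words := PySem.Str.split₀ line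
        if (trump_words.length : Int) < n + margin ∧ (trump_words.length : Int) > n - margin
        then acc ++ [trump_words] else acc) []
    if potential = [] then gpLoop n combined (margin + 1) fuel else potential

def get_potential (shake_line : String) (trump_speech : List String) (trump_tweets : List String) : List (List String) :=
  let shake_words := PySem.Str.split₀ shake_line
  let shake_length : Int := shake_words.length
  let combined := trump_speech ++ trump_tweets
  let fuel := (combined.foldl (fun acc l => max acc (gpDist shake_length l)) 0).toNat + 2
  gpLoop shake_length combined 3 fuel

-- ===== PORT B =====
def get_potential_alt (shake_line : String) (trump_speech : List String) (trump_tweets : List String) : List (List String) :=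
  let shake_length : Int := (PySem.Str.split₀ shake_line).length
  let combined := trump_speech ++ trump_tweets
  let dists := combined.map (fun line => |((PySem.Str.split₀ line).length : Int) - shake_length|)
  match PySem.List.min? dists (fun x => x) with
  | none => []  -- unreachable under Pre_ (Python's min() raises on an empty list)
  | some d =>
    let threshold := max 3 (d + 1)
    combined.filterMap (fun line =>
      let tw := PySem.Str.split₀ line
      if |((tw.length : Int)) - shake_length| < threshold then some tw else none)

-- ===== PRECONDITION & SPEC =====
-- Pre_ excludes only inputs with an empty combined list trump_speech + trump_tweets:
-- there A loops forever (never returns) and B's min() raises ValueError.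
def Pre_get_potential (_shake_line : String) (trump_speech : List String) (trump_tweets : List String) : Prop :=
  trump_speech ++ trump_tweets ≠ []
instance (shake_line : String) (trump_speech : List String) (trump_tweets : List String) : Decidable (Pre_get_potential shake_line trump_speech trump_tweets) := by unfold Pre_get_potential; infer_instance

def pvWitness_get_potential : String × List String × List String := ("hello world", ["a b c d"], ["x"])

def Spec_get_potential (shake_line : String) (trump_speech : List String) (trump_tweets : List String) (out : List (List String)) : Prop := out = get_potential_alt shake_line trump_speech trump_tweets
instance (shake_line : String) (trump_speech : List String) (trump_tweets : List String) (out : List (List String)) : Decidable (Spec_get_potential shake_line trump_speech trump_tweets out) := by unfold Spec_get_potential; infer_instance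

-- ===== CLAIM (what is proved, stated in full; the proofs are below) =====
def Claim_equal_get_potential : Prop := ∀ (shake_line : String) (trump_speech : List String) (trump_tweets : List String), Dom_get_potential shake_line trump_speech trump_tweets → Pre_get_potential shake_line trump_speech trump_tweets → Spec_get_potential shake_line trump_speech trump_tweets (get_potential shake_line trump_speech trump_tweets)

-- ===== LEMMAS AND PROOFS =====

-- the matches at a given margin, as a filter-then-map
def gpMatches (n : Int) (combined : List String) (m : Int) : List (List String) :=
  (combined.filter (fun l => decide (gpDist n l < m))).map PySem.Str.split₀

lemma foldl_app_ite {α β : Type} (p : α → Prop) [DecidablePred p] (f : α → β)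
    (l : List α) (acc : List β) :
    l.foldl (fun a x => if p x then a ++ [f x] else a) acc
      = acc ++ (l.filter (fun x => decide (p x))).map f := by
  induction l generalizing acc with
  | nil => simp
  | cons x t ih =>
    by_cases h : p x <;> simp [List.foldl_cons, h, ih]

-- A's two-sided condition is the distance condition
lemma gp_cond_iff (n m k : Int) :
    ((k < n + m ∧ k > n - m) ↔ |k - n| < m) := by
  rw [abs_lt]; omega

lemma gpLoop_eq (n : Int) (combined : List String) (d : Int)
    (hmem : ∃ l ∈ combined, gpDist n l = d)
    (hmin : ∀ l ∈ combined, d ≤ gpDist n l) :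
    ∀ (fuel : Nat) (margin : Int), (d + 2 - margin).toNat < fuel →
      gpLoop n combined margin fuel = gpMatches n combined (max margin (d + 1)) := by
  intro fuel
  induction fuel with
  | zero => intro margin h; omega
  | succ f ih =>
    intro margin hf
    have hfold : combined.foldl
        (fun acc line =>
          let trump_words := PySem.Str.split₀ line
          if (trump_words.length : Int) < n + margin ∧ (trump_words.length : Int) > n - margin
          then acc ++ [trump_words] else acc) []
        = gpMatches n combined margin := by
      have := foldl_app_ite
        (fun line => ((PySem.Str.split₀ line).length : Int) < n + margin ∧
          ((PySem.Str.split₀ line).length : Int) > n - margin)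
        PySem.Str.split₀ combined []
      simp only [List.nil_append] at this
      rw [this, gpMatches]
      congr 1
      apply List.filter_congr
      intro l _
      simp only [decide_eq_decide]
      exact gp_cond_iff n margin _
    rw [gpLoop, hfold]
    by_cases hcase : d < margin
    · -- matches at this margin are nonempty: return them
      obtain ⟨l0, hl0, hd0⟩ := hmem
      have hne : gpMatches n combined margin ≠ [] := by
        intro hnil
        have : l0 ∈ combined.filter (fun l => decide (gpDist n l < margin)) :=
          List.mem_filter.mpr ⟨hl0, by simp [hd0, hcase]⟩
        rw [gpMatches] at hnil
        rcases List.map_eq_nil_iff.mp hnil with h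
        simp [h] at this
      have hmx : max margin (d + 1) = margin := by omega
      rw [if_neg hne, hmx]
    · -- no line qualifies: the pass adds nothing, loop again with margin+1
      have hnil : gpMatches n combined margin = [] := by
        rw [gpMatches, List.filter_eq_nil_iff.mpr, List.map_nil]
        intro l hl
        have := hmin l hl
        simp only [decide_eq_true_eq, not_lt]
        omega
      have hrec := ih (margin + 1) (by omega)
      have hmx : max (margin + 1) (d + 1) = max margin (d + 1) := by omega
      rw [if_pos hnil, hrec, hmx]

-- B's filterMap is the same filter-then-map
lemma filterMap_ite_eq {α β : Type} (p : α → Prop) [DecidablePred p] (f : α → β) (l : List α) :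
    l.filterMap (fun x => if p x then some (f x) else none)
      = (l.filter (fun x => decide (p x))).map f := by
  induction l with
  | nil => rfl
  | cons x t ih => by_cases h : p x <;> simp [h, ih]

-- ===== VERDICT (by name: the statement is the Claim_ definition above) =====
theorem get_potential_spec : Claim_equal_get_potential := by
  intro shake_line trump_speech trump_tweets _ hpre
  unfold Spec_get_potential get_potential get_potential_alt
  set n : Int := ((PySem.Str.split₀ shake_line).length : Int) with hn
  set combined := trump_speech ++ trump_tweets with hc
  have hne : combined ≠ [] := hpre
  -- the minimum distance exists
  have hmapne : combined.map (fun line => |((PySem.Str.split₀ line).length : Int) - n|) ≠ [] := by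
    simpa using hne
  obtain ⟨d, hd⟩ : ∃ d, PySem.List.min?
      (combined.map (fun line => |((PySem.Str.split₀ line).length : Int) - n|)) (fun x => x) = some d := by
    rcases h : PySem.List.min?
        (combined.map (fun line => |((PySem.Str.split₀ line).length : Int) - n|)) (fun x => x) with _ | d
    · exact absurd ((PySem.List.min?_eq_none_iff _ _).mp h) hmapne
    · exact ⟨d, rfl⟩
  have hdm := PySem.List.min?_mem hd
  have hdmin := PySem.List.min?_isMin hd
  have hmem : ∃ l ∈ combined, gpDist n l = d := by
    rcases List.mem_map.mp hdm with ⟨l, hl, he⟩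
    exact ⟨l, hl, he⟩
  have hmin : ∀ l ∈ combined, d ≤ gpDist n l := by
    intro l hl
    exact hdmin _ (List.mem_map_of_mem hl)
  -- d is at most the running max used as fuel, and d ≥ 0
  have hdmax : d ≤ combined.foldl (fun acc l => max acc (gpDist n l)) 0 := by
    obtain ⟨l0, hl0, hd0⟩ := hmem
    have := (PySem.List.le_foldl_max_int combined (gpDist n) 0).2 l0 hl0
    omega
  have hd0 : 0 ≤ d := by
    obtain ⟨l0, hl0, hd0⟩ := hmem
    have : 0 ≤ gpDist n l0 := abs_nonneg _
    omega
  have hloop := gpLoop_eq n combined d hmem hmin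
    ((combined.foldl (fun acc l => max acc (gpDist n l)) 0).toNat + 2) 3 (by omega)
  rw [hloop]
  simp only [hd]
  rw [filterMap_ite_eq (fun line => |((PySem.Str.split₀ line).length : Int) - n| < max 3 (d + 1))
    PySem.Str.split₀ combined]
  simp [gpMatches, gpDist]
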